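-- pv_equiv track=rewrite | github.com/AxlAV/Trabajo-final | app.py | calcular_subredes
-- ===== SOURCE A (Python) =====
-- def ip_a_binario(ip):
--     return ''.join([f'{int(octeto):08b}' for octeto in ip.split('.')])
--
-- def binario_a_ip(binario):
--     return '.'.join([str(int(binario[i:i+8], 2)) for i in range(0, 32, 8)])
--
-- def calcular_subredes(ip, prefijo, num_subredes):
--     ip_binario = ip_a_binario(ip)
--     prefijo_longitud = prefijo
--
--     bits_necesarios = (num_subredes - 1).bit_length()
--     nueva_mascara_longitud = prefijo_longitud + bits_necesarios
--     nueva_mascara_binario = '1' * nueva_mascara_longitud + '0' * (32 - nueva_mascara_longitud)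
--     nueva_mascara = binario_a_ip(nueva_mascara_binario)
--
--     subredes = []
--     for i in range(num_subredes):
--         subred_binario = ip_binario[:prefijo_longitud] + f'{i:0{bits_necesarios}b}' + '0' * (32 - prefijo_longitud - bits_necesarios)
--         subredes.append(binario_a_ip(subred_binario) + f'/{nueva_mascara_longitud}')
--
--     return nueva_mascara, subredes
-- ===== SOURCE B (Python) =====
-- def _int_a_ip(x):
--     return '.'.join(str((x >> s) % 256) for s in (24, 16, 8, 0))
--
-- def calcular_subredes(ip, prefijo, num_subredes):
--     octetos = [int(o) for o in ip.split('.')]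
--     ip_int = 0
--     for o in octetos:
--         ip_int = ip_int * 256 + o
--     n_bits = 8 * len(octetos)
--     bits = (num_subredes - 1).bit_length()
--     longitud = prefijo + bits
--     mascara = _int_a_ip(((1 << longitud) - 1) << (32 - longitud))
--     red = ip_int >> (n_bits - prefijo)
--     subredes = [f'{_int_a_ip(((red << bits) + i) << (32 - longitud))}/{longitud}'
--                 for i in range(num_subredes)]
--     return mascara, subredes
-- ===== Notes on version B (the rewrite author's own statement) =====
-- stated objective: alternative
-- what changed: A builds binary strings per address (octet formatting, string slicing/concatenation, base-2 reparsing of four slices); B never builds bit strings: it packs the octets into one integer and computes the mask, the network prefix and each subnet with shifts and modular arithmetic. Pre_ restricts to the natural domain (octets 0..255, 0 <= prefijo <= address bits, prefijo + bits needed <= 32); …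
-- outside the precondition, e.g. on calcular_subredes('1.2.3.4', -8, 2): A returns ('0.0.0.0', ['1.2.3.0/-7', '1.2.3.128/-7']), B raises ValueError; on calcular_subredes('1.2', 20, 2): A returns ('255.255.248.0', ['1.2.0.0/21', '1.2.128.0/21']), B raises ValueError
import Mathlib
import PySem

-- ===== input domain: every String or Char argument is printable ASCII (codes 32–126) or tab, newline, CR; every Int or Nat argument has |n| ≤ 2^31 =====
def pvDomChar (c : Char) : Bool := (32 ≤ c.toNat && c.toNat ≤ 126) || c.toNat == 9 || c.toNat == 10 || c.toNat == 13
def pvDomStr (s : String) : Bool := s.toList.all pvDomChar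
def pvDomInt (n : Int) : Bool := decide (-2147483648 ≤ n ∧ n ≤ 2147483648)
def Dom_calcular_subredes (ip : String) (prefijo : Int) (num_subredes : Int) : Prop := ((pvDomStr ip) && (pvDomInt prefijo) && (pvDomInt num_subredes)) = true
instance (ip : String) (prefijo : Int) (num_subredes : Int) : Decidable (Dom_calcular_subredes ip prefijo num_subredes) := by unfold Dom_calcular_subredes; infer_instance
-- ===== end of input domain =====

-- B replaces A's binary-string building/slicing/parsing by 32-bit integer arithmetic
-- (one packed address integer; mask, base and subnets by shifts and mod); same results on Pre_.

-- ===== PORT A =====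

-- binary digits of n, most significant first (helper for Python's format(n, 'b'))
def pvBinAux : Nat → List Char → List Char
  | 0, acc => acc
  | n+1, acc => pvBinAux ((n+1)/2) ((if (n+1) % 2 == 1 then '1' else '0') :: acc)
decreasing_by exact Nat.div_lt_self (Nat.succ_pos n) (by omega)

-- format(v, 'b'): minimal binary digits, '-' sign in front for negative v
def pvBinDigits (v : Int) : List Char :=
  if v < 0 then '-' :: pvBinAux (-v).toNat []
  else if v = 0 then ['0']
  else pvBinAux v.toNat []

-- f'{v:0{w}b}' = format(v, 'b') left-padded with '0' to width w (sign kept in front) = zfill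
def pvFmtB (v : Int) (w : Nat) : List Char := PySem.Chars.zfill (pvBinDigits v) w

-- ip_a_binario: ''.join(f'{int(octeto):08b}' for octeto in ip.split('.'))
-- int(octeto) raises ValueError when unparseable: excluded by Pre_, so the .getD 0 is unreachable there
def pvIpABinario (ip : String) : List Char :=
  (((PySem.Str.split? ip ".").getD []).map (fun o => pvFmtB ((PySem.Int.ofStr? o).getD 0) 8)).flatten

-- binario_a_ip: '.'.join(str(int(binario[i:i+8], 2)) for i in range(0, 32, 8))
-- int(s, 2) raises ValueError on an empty/invalid slice: excluded by Pre_, so the .getD 0 is unreachable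
def pvBinarioAIp (b : List Char) : List Char :=
  PySem.Chars.join ['.'] ((PySem.List.pyRange 0 32 8).map (fun i =>
    PySem.Int.toChars ((PySem.Int.ofCharsBase? (PySem.List.slice b (some i) (some (i + 8))) 2).getD 0)))

def calcular_subredes (ip : String) (prefijo : Int) (num_subredes : Int) : String × List String :=
  let ip_binario := pvIpABinario ip
  let prefijo_longitud := prefijo
  let bits_necesarios : Nat := PySem.Int.bitLength (num_subredes - 1)
  let nueva_mascara_longitud : Int := prefijo_longitud + (bits_necesarios : Int)
  -- '1' * L + '0' * (32 - L)  (Python's str * negative = '' is exactly Int.toNat's clamp to 0)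
  let nueva_mascara_binario := List.replicate nueva_mascara_longitud.toNat '1' ++
                               List.replicate ((32 : Int) - nueva_mascara_longitud).toNat '0'
  let nueva_mascara := String.ofList (pvBinarioAIp nueva_mascara_binario)
  let subredes := (PySem.List.pyRange 0 num_subredes 1).map (fun i =>
    let subred_binario := PySem.List.slice ip_binario none (some prefijo_longitud) ++
                          pvFmtB i bits_necesarios ++
                          List.replicate ((32 : Int) - prefijo_longitud - (bits_necesarios : Int)).toNat '0'
    String.ofList (pvBinarioAIp subred_binario ++ '/' :: PySem.Int.toChars nueva_mascara_longitud))
  (nueva_mascara, subredes)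

-- ===== PORT B =====

-- _int_a_ip: '.'.join(str((x >> s) % 256) for s in (24, 16, 8, 0))
def pvIntAIp (x : Int) : List Char :=
  PySem.Chars.join ['.'] (([24, 16, 8, 0] : List Int).map (fun s =>
    PySem.Int.toChars (PySem.Int.mod (PySem.Int.floordiv x (2 ^ s.toNat)) 256)))

-- Python raises on a negative shift count; such inputs are outside Pre_, where the
-- Int.toNat exponents below clamp instead (unreachable under Pre_).
-- int(o) raises ValueError on an unparseable octet: excluded by Pre_, so .getD 0 is unreachable
def calcular_subredes_alt (ip : String) (prefijo : Int) (num_subredes : Int) : String × List String :=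
  let octetos := ((PySem.Str.split? ip ".").getD []).map (fun o => (PySem.Int.ofStr? o).getD 0)
  let ip_int := octetos.foldl (fun acc o => acc * 256 + o) 0
  let n_bits : Int := 8 * (octetos.length : Int)
  let bits : Nat := PySem.Int.bitLength (num_subredes - 1)
  let longitud : Int := prefijo + (bits : Int)
  let mascara := pvIntAIp ((2 ^ longitud.toNat - 1) * 2 ^ ((32 : Int) - longitud).toNat)
  let red := PySem.Int.floordiv ip_int (2 ^ (n_bits - prefijo).toNat)
  let subredes := (PySem.List.pyRange 0 num_subredes 1).map (fun i =>
    String.ofList (pvIntAIp ((red * 2 ^ bits + i) * 2 ^ ((32 : Int) - longitud).toNat) ++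
      '/' :: PySem.Int.toChars longitud))
  (String.ofList mascara, subredes)

-- ===== PRECONDITION & SPEC =====
-- Pre_ restricts to the natural domain of the task: every octet parses and is 0..255, the
-- prefix is nonnegative and no longer than the address's bits, and prefijo + bits needed
-- for the subnets is at most 32. Outside it A either raises (unparseable octet) or returns
-- strings assembled by accident of slicing (>8-bit octets, negative prefixes sliced from
-- the right, masks truncated at 32 bits, '/-7' or '/33' suffixes) that are not subnet
-- data; B raises on the corresponding negative shifts.
def Pre_calcular_subredes (ip : String) (prefijo : Int) (num_subredes : Int) : Prop :=
  (∀ o ∈ (PySem.Str.split? ip ".").getD [],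
    0 ≤ (PySem.Int.ofStr? o).getD (-1) ∧ (PySem.Int.ofStr? o).getD (-1) ≤ 255) ∧
  0 ≤ prefijo ∧
  prefijo ≤ 8 * ((((PySem.Str.split? ip ".").getD []).length : Nat) : Int) ∧
  prefijo + (PySem.Int.bitLength (num_subredes - 1) : Int) ≤ 32

instance (ip : String) (prefijo : Int) (num_subredes : Int) : Decidable (Pre_calcular_subredes ip prefijo num_subredes) := by
  unfold Pre_calcular_subredes; infer_instance

def pvWitness_calcular_subredes : String × Int × Int := ("192.168.1.0", 24, 4)

def Spec_calcular_subredes (ip : String) (prefijo : Int) (num_subredes : Int) (out : String × List String) : Prop := out = calcular_subredes_alt ip prefijo num_subredes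
instance (ip : String) (prefijo : Int) (num_subredes : Int) (out : String × List String) : Decidable (Spec_calcular_subredes ip prefijo num_subredes out) := by unfold Spec_calcular_subredes; infer_instance

-- ===== CLAIM (what is proved, stated in full; the proofs are below) =====
def Claim_equal_calcular_subredes : Prop := ∀ (ip : String) (prefijo : Int) (num_subredes : Int), Dom_calcular_subredes ip prefijo num_subredes → Pre_calcular_subredes ip prefijo num_subredes → Spec_calcular_subredes ip prefijo num_subredes (calcular_subredes ip prefijo num_subredes)

-- ===== LEMMAS AND PROOFS =====

-- the k-bit big-endian binary string of n (mod 2^k): the reference both ports are related to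
def pvNatBits : Nat → Nat → List Char
  | 0, _ => []
  | k+1, n => pvNatBits k (n / 2) ++ [if n % 2 == 1 then '1' else '0']

theorem pvNatBits_len (k n : Nat) : (pvNatBits k n).length = k := by
  induction k generalizing n with
  | zero => rfl
  | succ k ih => simp [pvNatBits, ih]

theorem pvNatBits_zero (k : Nat) : pvNatBits k 0 = List.replicate k '0' := by
  induction k with
  | zero => rfl
  | succ k ih => simp [pvNatBits, ih, List.replicate_succ' (n := k)]

theorem pvNatBits_mod (k n : Nat) : pvNatBits k (n % 2 ^ k) = pvNatBits k n := by
  induction k generalizing n with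
  | zero => rfl
  | succ k ih =>
    have h1 : n % 2 ^ (k+1) % 2 = n % 2 :=
      Nat.mod_mod_of_dvd n (dvd_pow_self 2 (Nat.succ_ne_zero k))
    have h2 : n % 2 ^ (k+1) / 2 = n / 2 % 2 ^ k := by
      have := Nat.mod_mul_right_div_self n 2 (2 ^ k)
      simpa [pow_succ, mul_comm] using this
    simp [pvNatBits, h1, h2, ih]

theorem pvNatBits_append (a b n m : Nat) (hm : m < 2 ^ b) :
    pvNatBits a n ++ pvNatBits b m = pvNatBits (a + b) (n * 2 ^ b + m) := by
  induction b generalizing m with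
  | zero =>
    interval_cases m
    simp [pvNatBits]
  | succ b ih =>
    have hp : (2:Nat) ^ (b+1) = 2 * 2 ^ b := by ring
    have hx : n * 2 ^ (b+1) = 2 * (n * 2 ^ b) := by ring
    have hd : (n * 2 ^ (b+1) + m) / 2 = n * 2 ^ b + m / 2 := by rw [hx]; omega
    have hm2 : (n * 2 ^ (b+1) + m) % 2 = m % 2 := by rw [hx]; omega
    have hmb : m / 2 < 2 ^ b := by omega
    show pvNatBits a n ++ (pvNatBits b (m / 2) ++ _) = pvNatBits (a + (b+1)) _
    rw [← List.append_assoc, ih (m / 2) hmb]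
    show _ = pvNatBits ((a + b) + 1) _
    simp [pvNatBits, hd, hm2]

theorem pvNatBits_split (j k n : Nat) (h : j ≤ k) :
    pvNatBits k n = pvNatBits (k - j) (n / 2 ^ j) ++ pvNatBits j n := by
  have h1 := pvNatBits_append (k - j) j (n / 2 ^ j) (n % 2 ^ j)
    (Nat.mod_lt _ (Nat.two_pow_pos j))
  rw [pvNatBits_mod] at h1
  rw [show k - j + j = k by omega, Nat.div_add_mod'] at h1
  exact h1.symm

theorem pvNatBits_take (j k n : Nat) (h : j ≤ k) :
    (pvNatBits k n).take j = pvNatBits j (n / 2 ^ (k - j)) := by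
  rw [pvNatBits_split (k - j) k n (by omega)]
  rw [show k - (k - j) = j by omega]
  exact List.take_left' (pvNatBits_len _ _)

theorem pvNatBits_pad (j k m : Nat) (hm : m < 2 ^ j) (hjk : j ≤ k) :
    pvNatBits k m = List.replicate (k - j) '0' ++ pvNatBits j m := by
  rw [pvNatBits_split j k m hjk, Nat.div_eq_of_lt hm, pvNatBits_zero]

theorem pvNatBits_ones (k : Nat) : pvNatBits k (2 ^ k - 1) = List.replicate k '1' := by
  induction k with
  | zero => rfl
  | succ k ih =>
    have hp : (2:Nat) ^ (k+1) = 2 * 2 ^ k := by ring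
    have h1 : (0:Nat) < 2 ^ k := Nat.two_pow_pos k
    have hd : (2 ^ (k+1) - 1) / 2 = 2 ^ k - 1 := by omega
    have hm : (2 ^ (k+1) - 1) % 2 = 1 := by omega
    simp [pvNatBits, hd, hm, ih, List.replicate_succ' (n := k)]

theorem pvNatBits_chars (k n : Nat) : ∀ c ∈ pvNatBits k n, c = '0' ∨ c = '1' := by
  induction k generalizing n with
  | zero => intro c hc; simp [pvNatBits] at hc
  | succ k ih =>
    intro c hc
    simp only [pvNatBits, List.mem_append, List.mem_singleton] at hc
    rcases hc with hc | hc
    · exact ih _ c hc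
    · subst hc; split <;> simp

-- pvBinAux computes the exact (unpadded) binary digits
theorem pvBinAux_eq (n : Nat) (hn : 0 < n) : ∀ acc,
    pvBinAux n acc = pvNatBits (PySem.Int.bitLength (n : Int)) n ++ acc := by
  induction n using Nat.strong_induction_on with
  | _ n ih =>
    intro acc
    match n, hn with
    | n+1, _ =>
      rw [pvBinAux]
      rw [PySem.Int.bitLength_natCast (by omega : 0 < n + 1)]
      by_cases h0 : (n+1)/2 = 0
      · have hn1 : n = 0 := by omega
        subst hn1
        rw [pvBinAux]
        simp [pvNatBits, PySem.Int.bitLength_zero]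
      · rw [ih ((n+1)/2) (by omega) (by omega) _]
        simp [pvNatBits, List.append_assoc]

theorem bitLength_le (w n : Nat) (h : n < 2 ^ w) : PySem.Int.bitLength (n : Int) ≤ w := by
  induction w generalizing n with
  | zero =>
    have h0 : n = 0 := by omega
    simp [h0, PySem.Int.bitLength_zero]
  | succ w ih =>
    rcases Nat.eq_zero_or_pos n with h0 | h0
    · simp [h0, PySem.Int.bitLength_zero]
    · rw [PySem.Int.bitLength_natCast h0]
      have hp : (2:Nat) ^ (w+1) = 2 * 2 ^ w := by ring
      exact Nat.succ_le_succ (ih _ (by omega))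

theorem lt_two_pow_bitLength' (n : Nat) : n < 2 ^ PySem.Int.bitLength (n : Int) := by
  have := PySem.Int.lt_two_pow_bitLength (n : Int)
  simpa using this

theorem bitLength_pos (n : Nat) (hn : 0 < n) : 0 < PySem.Int.bitLength (n : Int) := by
  rw [PySem.Int.bitLength_natCast hn]; omega

-- f'{m:0{w}b}' is the w-bit string of m, for 0 < w and m < 2^w
theorem pvFmtB_eq (w m : Nat) (hw : 0 < w) (hm : m < 2 ^ w) :
    pvFmtB (m : Int) w = pvNatBits w m := by
  unfold pvFmtB pvBinDigits
  rcases Nat.eq_zero_or_pos m with h0 | h0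
  · subst h0
    rw [if_neg (by norm_num), if_pos (by norm_num)]
    rw [pvNatBits_zero]
    unfold PySem.Chars.zfill
    by_cases h1 : w = 1
    · subst h1; simp
    · rw [if_neg (by simp; omega)]
      simp only []
      rw [if_neg (by decide)]
      rw [show List.replicate w '0' = List.replicate (w - 1) '0' ++ ['0'] by
        rw [← List.replicate_succ' (n := w - 1)]; congr 1; omega]
      simp
  · rw [if_neg (by simp), if_neg (by exact_mod_cast h0.ne')]
    simp only [Int.toNat_natCast]
    rw [pvBinAux_eq m h0 []]
    rw [List.append_nil]
    have hL1 : 0 < PySem.Int.bitLength (m : Int) := bitLength_pos m h0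
    have hLw : PySem.Int.bitLength (m : Int) ≤ w := bitLength_le w m hm
    have hlen : (pvNatBits (PySem.Int.bitLength (m : Int)) m).length =
        PySem.Int.bitLength (m : Int) := pvNatBits_len _ _
    rcases hcs : pvNatBits (PySem.Int.bitLength (m : Int)) m with _ | ⟨c, rest⟩
    · rw [hcs] at hlen; simp at hlen; omega
    · have hc : c = '0' ∨ c = '1' :=
        pvNatBits_chars _ m c (by rw [hcs]; exact List.mem_cons_self ..)
      unfold PySem.Chars.zfill
      by_cases hE : (w : Int) ≤ (c :: rest).length
      · rw [if_pos hE]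
        have hwL : w = PySem.Int.bitLength (m : Int) := by
          rw [hcs] at hlen; simp at hlen hE; omega
        rw [← hcs, hwL]
      · rw [if_neg hE]
        simp only []
        rw [if_neg (by rcases hc with h | h <;> subst h <;> simp)]
        rw [← hcs]
        rw [pvNatBits_pad (PySem.Int.bitLength (m : Int)) w m (lt_two_pow_bitLength' m) hLw]
        congr 2
        simp only [pvNatBits_len, Int.toNat_natCast]

set_option maxRecDepth 100000 in
theorem pvParse1_fin : ∀ m : Fin 2,
    PySem.Int.ofCharsBase? (pvNatBits 1 m.val) 2 = some (m.val : Int) := by decide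

set_option maxRecDepth 100000 in
theorem pvParse2_fin : ∀ m : Fin 4,
    PySem.Int.ofCharsBase? (pvNatBits 2 m.val) 2 = some (m.val : Int) := by decide

set_option maxRecDepth 100000 in
theorem pvParse3_fin : ∀ m : Fin 8,
    PySem.Int.ofCharsBase? (pvNatBits 3 m.val) 2 = some (m.val : Int) := by decide

set_option maxRecDepth 100000 in
theorem pvParse4_fin : ∀ m : Fin 16,
    PySem.Int.ofCharsBase? (pvNatBits 4 m.val) 2 = some (m.val : Int) := by decide

set_option maxRecDepth 100000 in
theorem pvParse5_fin : ∀ m : Fin 32,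
    PySem.Int.ofCharsBase? (pvNatBits 5 m.val) 2 = some (m.val : Int) := by decide

set_option maxRecDepth 100000 in
theorem pvParse6_fin : ∀ m : Fin 64,
    PySem.Int.ofCharsBase? (pvNatBits 6 m.val) 2 = some (m.val : Int) := by decide

set_option maxRecDepth 100000 in
theorem pvParse7_fin : ∀ m : Fin 128,
    PySem.Int.ofCharsBase? (pvNatBits 7 m.val) 2 = some (m.val : Int) := by decide

set_option maxRecDepth 100000 in
theorem pvParse8_fin : ∀ m : Fin 256,
    PySem.Int.ofCharsBase? (pvNatBits 8 m.val) 2 = some (m.val : Int) := by decide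

theorem pvParseW (w m : Nat) (h1 : 1 ≤ w) (h8 : w ≤ 8) (hm : m < 2 ^ w) :
    PySem.Int.ofCharsBase? (pvNatBits w m) 2 = some (m : Int) := by
  interval_cases w
  · exact pvParse1_fin ⟨m, by omega⟩
  · exact pvParse2_fin ⟨m, by norm_num at hm; omega⟩
  · exact pvParse3_fin ⟨m, by norm_num at hm; omega⟩
  · exact pvParse4_fin ⟨m, by norm_num at hm; omega⟩
  · exact pvParse5_fin ⟨m, by norm_num at hm; omega⟩
  · exact pvParse6_fin ⟨m, by norm_num at hm; omega⟩
  · exact pvParse7_fin ⟨m, by norm_num at hm; omega⟩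
  · exact pvParse8_fin ⟨m, by norm_num at hm; omega⟩

theorem pvRange4 : PySem.List.pyRange 0 32 8 = [0, 8, 16, 24] := by decide

theorem pvRangeJ : PySem.List.pyRange 0 4 1 = [0, 1, 2, 3] := by decide

theorem pvNatBits_drop (j k n : Nat) (h : j ≤ k) :
    (pvNatBits k n).drop j = pvNatBits (k - j) n := by
  rw [pvNatBits_split (k - j) k n (by omega), show k - (k - j) = j by omega]
  exact List.drop_left' (pvNatBits_len _ _)

-- the reference window formatter: the four ip slices [8j:8j+8] of a t-character binary
-- window, read arithmetically (proof-only; both ports' formatters are reduced to it)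
def pvVentanaAIp (s_val : Int) (t : Int) : List Char :=
  PySem.Chars.join ['.'] ((PySem.List.pyRange 0 4 1).map (fun j =>
    let alto := min (8 * j + 8) t
    PySem.Int.toChars (PySem.Int.mod (PySem.Int.floordiv s_val (2 ^ (t - alto).toNat))
      (2 ^ (alto - 8 * j).toNat))))

-- B's formatter is the reference window formatter at t = 32
theorem pvIntAIp_eq (x : Int) : pvIntAIp x = pvVentanaAIp x 32 := by
  unfold pvIntAIp pvVentanaAIp
  rw [pvRangeJ]
  norm_num
  rw [show ((2:ℤ) ^ Int.toNat 8) = 256 by decide]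

-- one octet slice [i:i+8] of a T-character binary string (ragged at the right edge)
theorem pvChunkG (T N : Nat) (i : Int) (hi : 0 ≤ i) (hiT : i.toNat < T) :
    PySem.List.slice (pvNatBits T N) (some i) (some (i + 8)) =
      pvNatBits (min (i.toNat + 8) T - i.toNat) (N / 2 ^ (T - min (i.toNat + 8) T)) := by
  rw [PySem.List.slice_toNat _ hi (by omega)]
  rw [show (i + 8).toNat - i.toNat = 8 by omega]
  rw [pvNatBits_drop i.toNat T N (by omega)]
  by_cases h8 : 8 ≤ T - i.toNat
  · rw [pvNatBits_take 8 (T - i.toNat) N h8]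
    rw [show min (i.toNat + 8) T = i.toNat + 8 by omega]
    rw [show T - i.toNat - 8 = T - (i.toNat + 8) by omega,
        show i.toNat + 8 - i.toNat = 8 by omega]
  · rw [List.take_of_length_le (by rw [pvNatBits_len]; omega)]
    rw [show min (i.toNat + 8) T = T by omega]
    rw [Nat.sub_self, pow_zero, Nat.div_one]

-- the value of one octet slice, as A parses it and as the window arithmetic computes it
theorem pvChunkVal (T N : Nat) (hT : 24 < T) (i : Int) (hi : 0 ≤ i) (hi24 : i.toNat ≤ 24) :
    ((PySem.Int.ofCharsBase? (PySem.List.slice (pvNatBits T N) (some i) (some (i + 8))) 2).getD 0)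
      = ((N / 2 ^ (T - min (i.toNat + 8) T) % 2 ^ (min (i.toNat + 8) T - i.toNat) : Nat) : Int) := by
  rw [pvChunkG T N i hi (by omega)]
  rw [← pvNatBits_mod (min (i.toNat + 8) T - i.toNat)]
  rw [pvParseW _ _ (by omega) (by omega) (Nat.mod_lt _ (Nat.two_pow_pos _))]
  rfl

-- the central bridge: A's four-slice string round-trip equals the window arithmetic
theorem pvBA_nb_gen (T S : Nat) (hT : 24 < T) :
    pvBinarioAIp (pvNatBits T S) = pvVentanaAIp (S : Int) (T : Int) := by
  unfold pvBinarioAIp pvVentanaAIp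
  rw [pvRange4, pvRangeJ]
  simp only [List.map_cons, List.map_nil]
  rw [pvChunkVal T S hT 0 (by norm_num) (by norm_num),
      pvChunkVal T S hT 8 (by norm_num) (by norm_num),
      pvChunkVal T S hT 16 (by norm_num) (by norm_num),
      pvChunkVal T S hT 24 (by norm_num) (by norm_num)]
  rw [show Int.toNat 0 = 0 from rfl, show Int.toNat 8 = 8 from rfl,
      show Int.toNat 16 = 16 from rfl, show Int.toNat 24 = 24 from rfl]
  have e : ∀ j : Nat, j ≤ 24 → 8 ∣ j →
      PySem.Int.toChars (((S / 2 ^ (T - min (j + 8) T) % 2 ^ (min (j + 8) T - j) : Nat)) : Int) =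
      PySem.Int.toChars (PySem.Int.mod
        (PySem.Int.floordiv (S : Int) (2 ^ (((T : Int)) - min ((j : Int) + 8) (T : Int)).toNat))
        (2 ^ ((min ((j : Int) + 8) (T : Int)) - (j : Int)).toNat)) := by
    intro j hj _
    congr 1
    have hmin : min ((j : Int) + 8) (T : Int) = ((min (j + 8) T : Nat) : Int) := by omega
    rw [hmin]
    have c1 : (((T : Int)) - ((min (j + 8) T : Nat) : Int)).toNat = T - min (j + 8) T := by omega
    have c2 : ((((min (j + 8) T : Nat)) : Int) - (j : Int)).toNat = min (j + 8) T - j := by omega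
    rw [c1, c2]
    rw [show ((2:Int) ^ (T - min (j + 8) T)) = ((2 ^ (T - min (j + 8) T) : Nat) : Int) by
      push_cast; ring]
    rw [PySem.Int.floordiv_natCast]
    rw [show ((2:Int) ^ (min (j + 8) T - j)) = ((2 ^ (min (j + 8) T - j) : Nat) : Int) by
      push_cast; ring]
    rw [PySem.Int.mod_natCast]
  have e0 := e 0 (by omega) (by omega)
  have e8 := e 8 (by omega) (by omega)
  have e16 := e 16 (by omega) (by omega)
  have e24 := e 24 (by omega) (by omega)
  norm_num only at e0 e8 e16 e24 ⊢
  rw [e0, e8, e16, e24]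

theorem pvBA_slice (s : List Char) (a b : Int) (ha : 0 ≤ a) (hb : 0 ≤ b) (hb32 : b.toNat ≤ 32) :
    PySem.List.slice (s.take 32) (some a) (some b) = PySem.List.slice s (some a) (some b) := by
  rw [PySem.List.slice_toNat _ ha hb, PySem.List.slice_toNat _ ha hb]
  rw [List.drop_take, List.take_take]
  congr 1
  omega

-- binario_a_ip only reads the first 32 characters
theorem pvBA_take32 (s : List Char) : pvBinarioAIp s = pvBinarioAIp (s.take 32) := by
  unfold pvBinarioAIp
  rw [pvRange4]
  simp only [List.map_cons, List.map_nil]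
  rw [pvBA_slice s 0 (0+8) (by norm_num) (by norm_num) (by norm_num),
      pvBA_slice s 8 (8+8) (by norm_num) (by norm_num) (by norm_num),
      pvBA_slice s 16 (16+8) (by norm_num) (by norm_num) (by norm_num),
      pvBA_slice s 24 (24+8) (by norm_num) (by norm_num) (by norm_num)]

-- a window of 32 or more characters is its first 32 characters
theorem pvVentana_trim (T S : Nat) (h : 32 ≤ T) :
    pvVentanaAIp (S : Int) (T : Int) = pvVentanaAIp ((S / 2 ^ (T - 32) : Nat) : Int) ((32:Int)) := by
  rw [← pvBA_nb_gen T S (by omega), pvBA_take32, pvNatBits_take 32 T S h,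
    pvBA_nb_gen 32 _ (by norm_num)]
  norm_num

-- the window decomposition: P prefix bits, then W bits of m, then Z zeros
theorem pvWindow_eq (P W Z q m : Nat) (hT : 24 < P + W + Z) (_hq : q < 2 ^ P) (hm : m < 2 ^ W) :
    pvBinarioAIp (pvNatBits P q ++ pvNatBits W m ++ List.replicate Z '0') =
      pvVentanaAIp ((((q * 2 ^ W + m) * 2 ^ Z : Nat)) : Int) (((P + W + Z : Nat)) : Int) := by
  rw [← pvNatBits_zero Z, List.append_assoc]
  rw [pvNatBits_append W Z m 0 (Nat.two_pow_pos _)]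
  have hmz : m * 2 ^ Z + 0 < 2 ^ (W + Z) := by
    rw [pow_add]
    have := Nat.mul_lt_mul_of_lt_of_le hm (le_refl (2 ^ Z)) (Nat.two_pow_pos _)
    omega
  rw [pvNatBits_append P (W + Z) q _ hmz]
  rw [pvBA_nb_gen (P + (W + Z)) _ (by omega)]
  have hv : q * 2 ^ (W + Z) + (m * 2 ^ Z + 0) = (q * 2 ^ W + m) * 2 ^ Z := by ring
  rw [hv, show P + (W + Z) = P + W + Z by omega]

-- the mask: '1'*L + '0'*(32-L) read back equals B's ((1<<L)-1) << (32-L), for 0 ≤ L ≤ 32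
theorem pvMask_eq (L : Int) (h0 : 0 ≤ L) (h32 : L ≤ 32) :
    pvBinarioAIp (List.replicate L.toNat '1' ++ List.replicate ((32:Int) - L).toNat '0') =
      pvIntAIp ((2 ^ L.toNat - 1) * 2 ^ ((32:Int) - L).toNat) := by
  rw [← pvNatBits_ones L.toNat, ← pvNatBits_zero ((32:Int) - L).toNat,
      pvNatBits_append _ _ _ 0 (Nat.two_pow_pos _),
      show L.toNat + ((32:Int) - L).toNat = 32 by omega,
      pvBA_nb_gen 32 _ (by norm_num), pvIntAIp_eq]
  congr 1
  have h1 : (1:Nat) ≤ 2 ^ L.toNat := Nat.one_le_two_pow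
  push_cast [Nat.cast_sub h1]
  norm_num

-- ip_a_binario of four parseable octets in 0..255 is the bit string of B's packed integer
theorem pvHorner (ps : List String)
    (h : ∀ o ∈ ps, 0 ≤ (PySem.Int.ofStr? o).getD (-1) ∧ (PySem.Int.ofStr? o).getD (-1) ≤ 255) :
    ∃ W : Nat, W < 2 ^ (8 * ps.length) ∧
      (ps.map (fun o => (PySem.Int.ofStr? o).getD 0)).foldl (fun acc o => acc * 256 + o) 0
        = (W : Int) ∧
      (ps.map (fun o => pvFmtB ((PySem.Int.ofStr? o).getD 0) 8)).flatten
        = pvNatBits (8 * ps.length) W := by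
  induction ps using List.reverseRecOn with
  | nil => exact ⟨0, by norm_num, rfl, rfl⟩
  | append_singleton ps o ih =>
    obtain ⟨W, hWb, hfold, hflat⟩ := ih (fun o' ho' => h o' (by simp [ho']))
    have ho := h o (by simp)
    obtain ⟨v, hv, hv0, hv255⟩ : ∃ v, PySem.Int.ofStr? o = some v ∧ 0 ≤ v ∧ v ≤ 255 := by
      cases heq : PySem.Int.ofStr? o with
      | none => rw [heq] at ho; simp at ho
      | some v => exact ⟨v, rfl, by rw [heq] at ho; simpa using ho⟩
    refine ⟨W * 256 + v.toNat, ?_, ?_, ?_⟩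
    · have hp : (2:Nat) ^ (8 * (ps ++ [o]).length) = 2 ^ (8 * ps.length) * 256 := by
        rw [List.length_append, List.length_singleton, show 8 * (ps.length + 1) = 8 * ps.length + 8 by omega, pow_add]
        norm_num
      rw [hp]
      omega
    · rw [List.map_append, List.foldl_append, hfold]
      simp only [List.map_cons, List.map_nil, List.foldl_cons, List.foldl_nil, hv,
        Option.getD_some]
      push_cast
      omega
    · rw [List.map_append, List.flatten_append, hflat]
      simp only [List.map_cons, List.map_nil, List.flatten_cons, List.flatten_nil,
        List.append_nil, hv, Option.getD_some]
      rw [show v = ((v.toNat : Nat) : Int) by omega, pvFmtB_eq 8 v.toNat (by norm_num) (by omega)]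
      rw [pvNatBits_append (8 * ps.length) 8 W v.toNat (by omega)]
      rw [List.length_append, List.length_singleton,
        show 8 * (ps.length + 1) = 8 * ps.length + 8 by omega]
      norm_num
      congr 1
      omega

-- one subnet: A's string assembly read back equals B's (red*2^bits + i) << (32-longitud)
theorem pvSubnet_eq (Wip LB : Nat) (prefijo : Int) (bits i' : Nat)
    (hWb : Wip < 2 ^ LB) (hp0 : 0 ≤ prefijo) (hpLB : prefijo ≤ (LB : Int))
    (hle : prefijo + (bits : Int) ≤ 32)
    (hib : i' < 2 ^ bits) :
    pvBinarioAIp (PySem.List.slice (pvNatBits LB Wip) none (some prefijo) ++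
        pvFmtB (i' : Int) bits ++
        List.replicate ((32:Int) - prefijo - (bits : Int)).toNat '0') =
    pvIntAIp ((PySem.Int.floordiv ((Wip : Nat) : Int) (2 ^ ((LB : Int) - prefijo).toNat) *
        2 ^ bits + (i' : Int)) *
      2 ^ ((32:Int) - (prefijo + (bits : Int))).toNat) := by
  set P : Nat := prefijo.toNat with hPdef
  have hP32 : P ≤ 32 := by omega
  have hPLB : P ≤ LB := by omega
  have hPb : P + bits ≤ 32 := by omega
  set Z : Nat := 32 - P - bits with hZdef
  set q : Nat := Wip / 2 ^ (LB - P) with hqdef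
  have hq : q < 2 ^ P := by
    rw [hqdef, Nat.div_lt_iff_lt_mul (Nat.two_pow_pos _), ← pow_add,
      show P + (LB - P) = LB by omega]
    exact hWb
  have hslice : PySem.List.slice (pvNatBits LB Wip) none (some prefijo) =
      pvNatBits P q := by
    rw [PySem.List.slice_to _ hp0, pvNatBits_take P LB Wip hPLB]
  have hfmt : pvFmtB (i' : Int) bits = pvNatBits (max bits 1) i' := by
    rcases Nat.eq_zero_or_pos bits with hb | hb
    · have hi0 : i' = 0 := by subst hb; norm_num at hib; omega
      subst hi0; subst hb
      decide
    · rw [show max bits 1 = bits by omega]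
      exact pvFmtB_eq bits i' (by omega) hib
  have hzc : ((32:Int) - prefijo - (bits : Int)).toNat = Z := by omega
  rw [hslice, hfmt, hzc]
  have him : i' < 2 ^ max bits 1 :=
    lt_of_lt_of_le hib (Nat.pow_le_pow_right (by norm_num) (le_max_left _ _))
  rw [pvWindow_eq P (max bits 1) Z q i' (by omega) hq him]
  have hfd : PySem.Int.floordiv ((Wip : Nat) : Int) (2 ^ ((LB : Int) - prefijo).toNat) =
      ((q : Nat) : Int) := by
    rw [show ((LB : Int) - prefijo).toNat = LB - P by omega]
    rw [show ((2:Int) ^ (LB - P)) = ((2 ^ (LB - P) : Nat) : Int) by push_cast; ring]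
    exact PySem.Int.floordiv_natCast _ _
  rw [hfd]
  rcases Nat.eq_zero_or_pos bits with hb | hb
  · -- bits = 0: i' = 0, the window is 33 characters and its head 32 are the base address
    have hi0 : i' = 0 := by subst hb; norm_num at hib; omega
    subst hi0
    have hW1 : max bits 1 = 1 := by omega
    rw [hW1]
    rw [pvVentana_trim (P + 1 + Z) _ (by omega)]
    rw [pvIntAIp_eq]
    congr 1
    have hdiv : (q * 2 ^ 1 + 0) * 2 ^ Z / 2 ^ (P + 1 + Z - 32) = q * 2 ^ Z := by
      rw [show P + 1 + Z - 32 = 1 by omega]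
      rw [show (q * 2 ^ 1 + 0) * 2 ^ Z = q * 2 ^ Z * 2 by ring]
      exact Nat.mul_div_cancel _ (by norm_num)
    rw [hdiv]
    have e1 : ((32:Int) - (prefijo + (bits : Int))).toNat = Z := by omega
    rw [e1, hb]
    push_cast
    ring
  · -- bits ≥ 1: the window is exactly 32 characters
    have hW1 : max bits 1 = bits := by omega
    rw [hW1, show ((P + bits + Z : Nat) : Int) = ((32 : Nat) : Int) by omega]
    rw [show ((32 : Nat) : Int) = (32 : Int) by norm_num, pvIntAIp_eq]
    congr 1
    have e2 : ((32:Int) - (prefijo + (bits : Int))).toNat = Z := by omega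
    rw [e2]
    push_cast
    ring

-- ===== VERDICT (by name: the statement is the Claim_ definition above) =====
set_option maxHeartbeats 1000000 in
theorem calcular_subredes_spec : Claim_equal_calcular_subredes := by
  intro ip prefijo num_subredes _hDom hPre
  obtain ⟨hoct, hp0, hpLB, hle⟩ := hPre
  unfold Spec_calcular_subredes
  obtain ⟨Wip, hWb, hfold, hflat⟩ := pvHorner ((PySem.Str.split? ip ".").getD []) hoct
  have hipbin : pvIpABinario ip =
      pvNatBits (8 * ((PySem.Str.split? ip ".").getD []).length) Wip := hflat
  simp only [calcular_subredes, calcular_subredes_alt, hfold, hipbin, List.length_map]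
  rw [Prod.mk.injEq]
  refine ⟨congrArg _ (pvMask_eq (prefijo + (PySem.Int.bitLength (num_subredes - 1) : Int))
    (by omega) hle), ?_⟩
  apply List.map_congr_left
  intro i hi
  obtain ⟨hi0, hin⟩ := PySem.List.mem_pyRange_one.mp hi
  obtain ⟨i', rfl⟩ : ∃ k : Nat, i = (k : Int) := ⟨i.toNat, by omega⟩
  have hib : i' < 2 ^ PySem.Int.bitLength (num_subredes - 1) := by
    have h1 := PySem.Int.lt_two_pow_bitLength (num_subredes - 1)
    have h2 : i' ≤ (num_subredes - 1).natAbs := by omega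
    exact lt_of_le_of_lt h2 h1
  have hcast : (8 : Int) * ((((PySem.Str.split? ip ".").getD []).length : Nat) : Int) =
      (((8 * ((PySem.Str.split? ip ".").getD []).length : Nat)) : Int) := by push_cast; ring
  rw [hcast] at hpLB ⊢
  exact congrArg String.ofList (congrArg (· ++ _)
    (pvSubnet_eq Wip _ prefijo _ i' hWb hp0 hpLB hle hib))
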